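-- pv_equiv track=rewrite | github.com/danharris923/scale-me-testsite | tools/web_research.py | _extract_psychology_principle
-- ===== SOURCE A (Python) =====
-- def _extract_psychology_principle(insight: str) -> str:
--     """Extract psychology principle from insight."""
--     insight_lower = insight.lower()
--
--     if any(word in insight_lower for word in ['urgency', 'limited', 'hurry']):
--         return 'urgency/scarcity'
--     elif any(word in insight_lower for word in ['trust', 'secure', 'safe']):
--         return 'trust building'
--     elif any(word in insight_lower for word in ['social', 'proof', 'testimonial']):
--         return 'social proof'
--     elif any(word in insight_lower for word in ['color', 'red', 'green', 'blue']):
--         return 'color psychology'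
--     else:
--         return 'general persuasion'
-- ===== SOURCE B (Python) =====
-- _KEYWORD_RANK = {
--     'urgency': 0, 'limited': 0, 'hurry': 0,
--     'trust': 1, 'secure': 1, 'safe': 1,
--     'social': 2, 'proof': 2, 'testimonial': 2,
--     'color': 3, 'red': 3, 'green': 3, 'blue': 3,
-- }
-- _LABELS = ['urgency/scarcity', 'trust building', 'social proof',
--            'color psychology', 'general persuasion']
--
--
-- def _extract_psychology_principle(insight: str) -> str:
--     """Extract psychology principle from insight."""
--     low = insight.lower()
--     best = len(_LABELS) - 1
--     for word, rank in _KEYWORD_RANK.items():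
--         if rank < best and word in low:
--             best = rank
--     return _LABELS[best]
-- ===== Notes on version B (the rewrite author's own statement) =====
-- stated objective: alternative
-- what changed: Replaced the if/elif first-match cascade by an exhaustive scan over a flat keyword-to-rank map that keeps the minimum matching rank and indexes a label array, recovering priority arithmetically instead of by branch order.
import Mathlib
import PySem

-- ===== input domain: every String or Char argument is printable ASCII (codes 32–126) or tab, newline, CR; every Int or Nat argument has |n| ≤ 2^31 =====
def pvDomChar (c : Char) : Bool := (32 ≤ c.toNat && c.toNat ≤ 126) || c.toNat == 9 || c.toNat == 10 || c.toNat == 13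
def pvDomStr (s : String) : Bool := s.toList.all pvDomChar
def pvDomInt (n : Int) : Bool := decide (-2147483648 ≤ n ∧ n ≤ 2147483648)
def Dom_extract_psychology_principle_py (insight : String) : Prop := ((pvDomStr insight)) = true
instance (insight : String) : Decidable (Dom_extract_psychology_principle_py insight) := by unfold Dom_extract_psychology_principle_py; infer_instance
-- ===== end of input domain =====

-- B replaces A's if/elif first-match cascade by an exhaustive min-rank scan over a flat keyword->rank map plus a label array (alternative decomposition, same cost).


-- ===== PORT A =====
-- Literal port of A: if/elif cascade of any-keyword-substring tests.
def extract_psychology_principle_py (insight : String) : String :=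
  let insight_lower := PySem.Str.lower insight
  if ["urgency", "limited", "hurry"].any (fun word => PySem.Str.isIn word insight_lower) then
    "urgency/scarcity"
  else if ["trust", "secure", "safe"].any (fun word => PySem.Str.isIn word insight_lower) then
    "trust building"
  else if ["social", "proof", "testimonial"].any (fun word => PySem.Str.isIn word insight_lower) then
    "social proof"
  else if ["color", "red", "green", "blue"].any (fun word => PySem.Str.isIn word insight_lower) then
    "color psychology"
  else
    "general persuasion"

-- ===== PORT B =====
-- Port of B: flat keyword->rank map (dict in insertion order), fold keeping the minimum matching rank.
def pvKeywordRank : List (String × Nat) :=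
  [("urgency", 0), ("limited", 0), ("hurry", 0),
   ("trust", 1), ("secure", 1), ("safe", 1),
   ("social", 2), ("proof", 2), ("testimonial", 2),
   ("color", 3), ("red", 3), ("green", 3), ("blue", 3)]

def pvLabels : List String :=
  ["urgency/scarcity", "trust building", "social proof", "color psychology", "general persuasion"]

def extract_psychology_principle_py_alt (insight : String) : String :=
  let low := PySem.Str.lower insight
  let best := pvKeywordRank.foldl
    (fun best wr => if wr.2 < best ∧ PySem.Str.isIn wr.1 low = true then wr.2 else best)
    (pvLabels.length - 1)
  -- LABELS[best]: best is always < pvLabels.length, so getD with any default is exact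
  pvLabels.getD best "general persuasion"

-- ===== PRECONDITION & SPEC =====
def Spec_extract_psychology_principle_py (insight : String) (out : String) : Prop := out = extract_psychology_principle_py_alt insight
instance (insight : String) (out : String) : Decidable (Spec_extract_psychology_principle_py insight out) := by unfold Spec_extract_psychology_principle_py; infer_instance

-- ===== CLAIM (what is proved, stated in full; the proofs are below) =====
def Claim_equal_extract_psychology_principle_py : Prop := ∀ (insight : String), Dom_extract_psychology_principle_py insight → Spec_extract_psychology_principle_py insight (extract_psychology_principle_py insight)

-- ===== LEMMAS AND PROOFS =====

-- ===== VERDICT (by name: the statement is the Claim_ definition above) =====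
set_option maxHeartbeats 2000000 in
theorem extract_psychology_principle_py_spec : Claim_equal_extract_psychology_principle_py := by
  intro insight _
  unfold Spec_extract_psychology_principle_py
  simp only [extract_psychology_principle_py, extract_psychology_principle_py_alt,
    pvKeywordRank, pvLabels]
  cases h1 : PySem.Str.isIn "urgency" (PySem.Str.lower insight)
  case true => simp_all
  cases h2 : PySem.Str.isIn "limited" (PySem.Str.lower insight)
  case true => simp_all
  cases h3 : PySem.Str.isIn "hurry" (PySem.Str.lower insight)
  case true => simp_all
  cases h4 : PySem.Str.isIn "trust" (PySem.Str.lower insight)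
  case true => simp_all
  cases h5 : PySem.Str.isIn "secure" (PySem.Str.lower insight)
  case true => simp_all
  cases h6 : PySem.Str.isIn "safe" (PySem.Str.lower insight)
  case true => simp_all
  cases h7 : PySem.Str.isIn "social" (PySem.Str.lower insight)
  case true => simp_all
  cases h8 : PySem.Str.isIn "proof" (PySem.Str.lower insight)
  case true => simp_all
  cases h9 : PySem.Str.isIn "testimonial" (PySem.Str.lower insight)
  case true => simp_all
  cases h10 : PySem.Str.isIn "color" (PySem.Str.lower insight)
  case true => simp_all
  cases h11 : PySem.Str.isIn "red" (PySem.Str.lower insight)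
  case true => simp_all
  cases h12 : PySem.Str.isIn "green" (PySem.Str.lower insight)
  case true => simp_all
  cases h13 : PySem.Str.isIn "blue" (PySem.Str.lower insight)
  case true => simp_all
  simp_all
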